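-- pv_equiv track=rewrite | github.com/alexfayers/affineCipherCoursework | affinecracker.py | coprime_gen
-- ===== SOURCE A (Python) =====
-- import math
--
-- def coprime_gen(n):  # find coprimes of a number 'n'
--     if n < 0:  # don't check if number is too small
--         return []
--     else:
--         coprimesTemp = []
--         for toCheck in range(1, n, 2):  # don't check even numbers as they cant be coprime
--             if math.gcd(toCheck, n) == 1:  # if current number is coprime with n
--                 coprimesTemp.append(toCheck)  # add number to returned array
--         return coprimesTemp
-- ===== SOURCE B (Python) =====
-- def coprime_gen(n):  # find coprimes of a number 'n'
--     if n < 0: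
--         return []
--     # sieve: every odd k sharing a factor with n is an odd multiple of some odd divisor d>1 of n
--     bad = set()
--     for d in range(3, n, 2):
--         if n % d == 0:
--             for k in range(d, n, 2 * d):
--                 bad.add(k)
--     return [k for k in range(1, n, 2) if k not in bad]
-- ===== Notes on version B (the rewrite author's own statement) =====
-- stated objective: alternative
-- what changed: Replaces the per-element gcd test with a sieve: mark the odd multiples of every odd nontrivial divisor of n in a set, then list the unmarked odd numbers below n.
import Mathlib
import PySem

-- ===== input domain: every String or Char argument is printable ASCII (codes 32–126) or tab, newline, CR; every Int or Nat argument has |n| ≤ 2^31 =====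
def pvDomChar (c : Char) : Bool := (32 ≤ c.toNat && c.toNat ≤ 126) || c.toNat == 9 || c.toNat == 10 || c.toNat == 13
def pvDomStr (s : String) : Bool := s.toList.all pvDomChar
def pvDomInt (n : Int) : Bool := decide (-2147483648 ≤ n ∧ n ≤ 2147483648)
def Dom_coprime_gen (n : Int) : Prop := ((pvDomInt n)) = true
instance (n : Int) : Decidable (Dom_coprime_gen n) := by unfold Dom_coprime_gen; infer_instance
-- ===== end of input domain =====

-- B replaces A's per-element gcd test by a divisor sieve (mark odd multiples of the odd nontrivial
-- divisors of n in a set); alternative algorithm of similar cost, return value identical.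

-- ===== PORT A =====
def coprime_gen (n : Int) : List Int :=
  if n < 0 then []
  else
    (PySem.List.pyRange 1 n 2).foldl
      (fun coprimesTemp toCheck =>
        if Int.gcd toCheck n = 1 then coprimesTemp ++ [toCheck] else coprimesTemp) []

-- ===== PORT B =====
def coprime_gen_alt (n : Int) : List Int :=
  if n < 0 then []
  else
    let bad : PySem.Set Int :=
      (PySem.List.pyRange 3 n 2).foldl
        (fun bad d =>
          if PySem.Int.mod n d = 0 then
            (PySem.List.pyRange d n (2 * d)).foldl (fun b k => PySem.Set.add b k) bad
          else bad) PySem.Set.empty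
    (PySem.List.pyRange 1 n 2).filter (fun k => decide (k ∉ bad))

-- ===== PRECONDITION & SPEC =====
def Spec_coprime_gen (n : Int) (out : List Int) : Prop := out = coprime_gen_alt n
instance (n : Int) (out : List Int) : Decidable (Spec_coprime_gen n out) := by unfold Spec_coprime_gen; infer_instance

-- ===== CLAIM (what is proved, stated in full; the proofs are below) =====
def Claim_equal_coprime_gen : Prop := ∀ (n : Int), Dom_coprime_gen n → Spec_coprime_gen n (coprime_gen n)

-- ===== LEMMAS AND PROOFS =====

-- membership after folding Set.add over a list
theorem mem_foldl_set_add (xs : List Int) (s : PySem.Set Int) (k : Int) :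
    k ∈ xs.foldl (fun b x => PySem.Set.add b x) s ↔ k ∈ s ∨ k ∈ xs := by
  induction xs generalizing s with
  | nil => simp
  | cons x xs ih =>
      simp only [List.foldl_cons, ih, PySem.Set.mem_add, List.mem_cons]
      tauto

-- membership in the sieve fold of B
theorem mem_sieve_fold (n k : Int) (l : List Int) (s : PySem.Set Int) :
    k ∈ l.foldl
        (fun bad d =>
          if PySem.Int.mod n d = 0 then
            (PySem.List.pyRange d n (2 * d)).foldl (fun b k => PySem.Set.add b k) bad
          else bad) s
    ↔ k ∈ s ∨ ∃ d ∈ l, PySem.Int.mod n d = 0 ∧ k ∈ PySem.List.pyRange d n (2 * d) := by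
  induction l generalizing s with
  | nil => simp
  | cons x l ih =>
      simp only [List.foldl_cons, List.mem_cons]
      by_cases hx : PySem.Int.mod n x = 0
      · simp only [hx, if_pos, ih, mem_foldl_set_add]
        constructor
        · rintro (⟨h | h⟩ | ⟨d, hd, h1, h2⟩)
          · exact Or.inl h
          · exact Or.inr ⟨x, Or.inl rfl, hx, h⟩
          · exact Or.inr ⟨d, Or.inr hd, h1, h2⟩
        · rintro (h | ⟨d, (rfl | hd), h1, h2⟩)
          · exact Or.inl (Or.inl h)
          · exact Or.inl (Or.inr h2)
          · exact Or.inr ⟨d, hd, h1, h2⟩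
      · simp only [hx, if_neg, ih, not_false_iff]
        constructor
        · rintro (h | ⟨d, hd, h1, h2⟩)
          · exact Or.inl h
          · exact Or.inr ⟨d, Or.inr hd, h1, h2⟩
        · rintro (h | ⟨d, (rfl | hd), h1, h2⟩)
          · exact Or.inl h
          · exact absurd h1 hx
          · exact Or.inr ⟨d, hd, h1, h2⟩

-- the number-theory core: for odd 1 ≤ k < n, gcd(k,n)=1 iff no odd divisor d>1 of n
-- has k among its odd multiples
theorem gcd_one_iff_not_sieved (n k : Int) (hk1 : 1 ≤ k) (hkn : k < n) (hodd : 2 ∣ k - 1) :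
    Int.gcd k n = 1 ↔
      ¬ ∃ d, (3 ≤ d ∧ d < n ∧ 2 ∣ d - 3) ∧ d ∣ n ∧ d ≤ k ∧ k < n ∧ 2 * d ∣ k - d := by
  constructor
  · rintro hg ⟨d, ⟨hd3, _, _⟩, hdn, _, _, hdk⟩
    have hdk' : d ∣ k := by
      obtain ⟨c, hc⟩ := hdk
      exact ⟨1 + 2 * c, by linarith⟩
    have hco : IsCoprime k n := Int.isCoprime_iff_gcd_eq_one.mpr hg
    have := Int.isUnit_iff.mp (hco.isUnit_of_dvd' hdk' hdn)
    omega
  · intro hno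
    by_contra hg
    have hgcd0 : Int.gcd k n ≠ 0 := by
      intro h0
      have := Int.gcd_eq_zero_iff.mp h0
      omega
    obtain ⟨p, hp, hpg⟩ := Nat.exists_prime_and_dvd (by exact_mod_cast hg)
    have hpk : (p : Int) ∣ k := dvd_trans (Int.natCast_dvd_natCast.mpr hpg) (Int.gcd_dvd_left k n)
    have hpn : (p : Int) ∣ n := dvd_trans (Int.natCast_dvd_natCast.mpr hpg) (Int.gcd_dvd_right k n)
    have hp2 : p ≠ 2 := by
      rintro rfl
      obtain ⟨c, hc⟩ := hpk
      omega
    have hpodd : Odd (p : Int) := by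
      have := hp.odd_of_ne_two hp2
      exact_mod_cast this.natCast
    have hp3 : 3 ≤ (p : Int) := by
      obtain ⟨m, hm⟩ := hpodd
      have := hp.two_le
      omega
    have hplek : (p : Int) ≤ k := Int.le_of_dvd (by omega) hpk
    obtain ⟨c, hc⟩ := hpk
    have hkodd : Odd k := ⟨(k - 1) / 2, by omega⟩
    have hcodd : Odd c := ((Int.odd_mul).mp (hc ▸ hkodd)).2
    obtain ⟨m, hm⟩ := hcodd
    refine hno ⟨(p : Int), ⟨hp3, by omega, ?_⟩, hpn, hplek, hkn, ⟨m, ?_⟩⟩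
    · obtain ⟨j, hj⟩ := hpodd; exact ⟨j - 1, by omega⟩
    · rw [hc, hm]; ring

-- characterization of B's bad set
theorem mem_bad_iff (n k : Int) :
    (k ∈ (PySem.List.pyRange 3 n 2).foldl
        (fun bad d =>
          if PySem.Int.mod n d = 0 then
            (PySem.List.pyRange d n (2 * d)).foldl (fun b k => PySem.Set.add b k) bad
          else bad) PySem.Set.empty)
    ↔ ∃ d, (3 ≤ d ∧ d < n ∧ 2 ∣ d - 3) ∧ d ∣ n ∧ d ≤ k ∧ k < n ∧ 2 * d ∣ k - d := by
  rw [mem_sieve_fold]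
  simp only [PySem.Set.empty, List.not_mem_nil, false_or]
  constructor
  · rintro ⟨d, hd, hmod, hk⟩
    rw [PySem.List.mem_pyRange_iff_of_pos (by norm_num)] at hd
    obtain ⟨hd3, hdn, hdp⟩ := hd
    rw [PySem.List.mem_pyRange_iff_of_pos (by omega)] at hk
    exact ⟨d, ⟨hd3, hdn, hdp⟩, (PySem.Int.mod_eq_zero_iff_dvd n d).mp hmod, hk⟩
  · rintro ⟨d, ⟨hd3, hdn, hdp⟩, hdvd, hk⟩
    refine ⟨d, ?_, (PySem.Int.mod_eq_zero_iff_dvd n d).mpr hdvd, ?_⟩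
    · rw [PySem.List.mem_pyRange_iff_of_pos (by norm_num)]
      exact ⟨hd3, hdn, hdp⟩
    · rw [PySem.List.mem_pyRange_iff_of_pos (by omega)]
      exact hk

-- ===== VERDICT (by name: the statement is the Claim_ definition above) =====
theorem coprime_gen_spec : Claim_equal_coprime_gen := by
  intro n _
  unfold Spec_coprime_gen coprime_gen coprime_gen_alt
  by_cases hn : n < 0
  · simp [hn]
  · simp only [hn, if_neg, not_false_iff]
    rw [PySem.List.foldl_append_ite_eq_filter (fun t => Int.gcd t n = 1), List.nil_append]
    apply List.filter_congr
    intro k hk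
    rw [PySem.List.mem_pyRange_iff_of_pos (by norm_num)] at hk
    obtain ⟨hk1, hkn, hkodd⟩ := hk
    simp only [decide_eq_decide]
    rw [gcd_one_iff_not_sieved n k hk1 hkn hkodd, ← mem_bad_iff n k]
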